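-- pv_equiv track=rewrite | github.com/Vskesha/learning-modules | leetcode_solutions/maximize_score_after_N_operations.py | max_score1
-- ===== SOURCE A (Python) =====
-- import math
--
-- def max_score1(nums): # dp iterative solution
--     n = len(nums)
--     max_states = 2 ** n
--     final_mask = max_states - 1
--     dp = [-1] * max_states
--     dp[final_mask] = 0
--     for state in range(final_mask - 1, -1, -1):
--         numbers_taken = bin(state).count('1')
--         if numbers_taken % 2:
--             continue
--         pairs_formed = numbers_taken // 2
--         for i in range(n):
--             if (state >> i) & 1:
--                 continue
--             for j in range(i+1, n):
--                 if (state >> j) & 1: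
--                     continue
--                 state_after = state | (1 << i) | (1 << j)
--                 current_score = (pairs_formed + 1) * math.gcd(nums[i], nums[j])
--                 remaining_score = dp[state_after]
--                 dp[state] = max(dp[state], current_score + remaining_score)
--     return dp[0]
-- ===== SOURCE B (Python) =====
-- import math
--
-- def max_score1(nums):  # top-down memoized recursion over bitmasks
--     n = len(nums)
--     final_mask = (1 << n) - 1
--     memo = [None] * (1 << n)
--
--     def rec(mask):
--         if mask == final_mask:
--             return 0
--         if memo[mask] is not None:
--             return memo[mask]
--         pairs = bin(mask).count('1') // 2
--         best = -1
--         for i in range(n):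
--             if (mask >> i) & 1:
--                 continue
--             for j in range(i + 1, n):
--                 if (mask >> j) & 1:
--                     continue
--                 best = max(best, (pairs + 1) * math.gcd(nums[i], nums[j])
--                            + rec(mask | (1 << i) | (1 << j)))
--         memo[mask] = best
--         return best
--
--     return rec(0)
-- ===== Notes on version B (the rewrite author's own statement) =====
-- stated objective: alternative
-- what changed: Bottom-up DP over an explicit array of all 2^n states is replaced by top-down memoized recursion from mask 0 that only ever visits even-popcount reachable states, with -1 as the empty-best sentinel so dead-end and odd-n results coincide with A.
import Mathlib
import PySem

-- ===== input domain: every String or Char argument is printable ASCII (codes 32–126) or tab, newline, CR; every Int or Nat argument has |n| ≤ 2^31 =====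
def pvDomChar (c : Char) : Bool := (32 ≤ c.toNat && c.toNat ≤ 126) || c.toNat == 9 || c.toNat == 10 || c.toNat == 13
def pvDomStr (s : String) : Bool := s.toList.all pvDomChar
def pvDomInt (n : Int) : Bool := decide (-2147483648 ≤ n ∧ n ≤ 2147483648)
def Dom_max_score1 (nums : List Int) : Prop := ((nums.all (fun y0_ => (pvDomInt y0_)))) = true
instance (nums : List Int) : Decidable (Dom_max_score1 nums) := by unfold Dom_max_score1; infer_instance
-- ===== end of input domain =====

-- B replaces A's bottom-up DP over an array of all 2^n states by top-down recursion from
-- mask 0 (memoized in Python) with -1 as the empty-best sentinel; same return value, no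
-- argument is mutated.

-- ===== PORT A =====
-- bin(state).count('1') on a nonnegative int is its bit count: PySem.Int.bitCount.
-- range(n) / range(i+1, n) (nonnegative bounds) are the Nat ranges List.range n /
-- List.range' (i+1) (n-(i+1)); dp[k] / nums[k] reads use getD, exact here because every
-- index is provably in range (state_after < 2^n = len(dp); i, j < n = len(nums));
-- state.toNat is exact because every state produced by range(final_mask-1, -1, -1) is ≥ 0.
def pvAInnerJ (nums : List Int) (n state i pairs : Nat) (dp : List Int) : List Int :=
  (List.range' (i+1) (n-(i+1))).foldl (fun dp j =>
    if (state >>> j) &&& 1 = 1 then dp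
    else
      let state_after := state ||| (1 <<< i) ||| (1 <<< j)
      let current_score := ((pairs : Int) + 1) * (Int.gcd (nums.getD i 0) (nums.getD j 0) : Int)
      let remaining_score := dp.getD state_after (-1)
      dp.set state (max (dp.getD state (-1)) (current_score + remaining_score))) dp

def pvAState (nums : List Int) (n : Nat) (dp : List Int) (state : Nat) : List Int :=
  let numbers_taken := PySem.Int.bitCount (state : Int)
  if numbers_taken % 2 = 1 then dp
  else
    (List.range n).foldl (fun dp i =>
      if (state >>> i) &&& 1 = 1 then dp
      else pvAInnerJ nums n state i (numbers_taken / 2) dp) dp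

def max_score1 (nums : List Int) : Int :=
  let n := nums.length
  let max_states := 2 ^ n
  let final_mask := max_states - 1
  let dp0 := (List.replicate max_states (-1 : Int)).set final_mask 0
  let dp := (PySem.List.pyRange ((final_mask : Int) - 1) (-1) (-1)).foldl
      (fun dp state => pvAState nums n dp state.toNat) dp0
  dp.getD 0 (-1)

-- ===== PORT B =====
-- rec's memo list (size 2**n, None = not yet computed) is threaded through the recursion
-- as an Array (Option Int) (random-access fixed-size list); memo[mask] = best is
-- setIfInBounds, exact because mask < 2**n = memo.size; the extra fuel argument (n+1,
-- strictly more than the recursion depth — see pvBRecM_ok below) only makes the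
-- recursion structural.
def pvBRecM (nums : List Int) (n final_mask : Nat) :
    Nat → Nat → Array (Option Int) → Int × Array (Option Int)
  | 0, _, memo => (-1, memo)
  | fuel+1, mask, memo =>
    if mask = final_mask then (0, memo)
    else
      match memo.getD mask none with
      | some v => (v, memo)
      | none =>
        let pairs := PySem.Int.bitCount (mask : Int) / 2
        let r := (List.range n).foldl (fun (acc : Int × Array (Option Int)) i =>
          if (mask >>> i) &&& 1 = 1 then acc
          else (List.range' (i+1) (n-(i+1))).foldl (fun acc j =>
            if (mask >>> j) &&& 1 = 1 then acc
            else
              let vr := pvBRecM nums n final_mask fuel (mask ||| (1 <<< i) ||| (1 <<< j)) acc.2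
              (max acc.1 (((pairs : Int) + 1) * (Int.gcd (nums.getD i 0) (nums.getD j 0) : Int)
                + vr.1), vr.2)) acc) (-1, memo)
        (r.1, r.2.setIfInBounds mask (some r.1))

def max_score1_alt (nums : List Int) : Int :=
  (pvBRecM nums nums.length (2 ^ nums.length - 1) (nums.length + 1) 0
    (Array.replicate (2 ^ nums.length) none)).1

-- ===== PRECONDITION & SPEC =====
def Spec_max_score1 (nums : List Int) (out : Int) : Prop := out = max_score1_alt nums
instance (nums : List Int) (out : Int) : Decidable (Spec_max_score1 nums out) := by unfold Spec_max_score1; infer_instance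

-- ===== CLAIM (what is proved, stated in full; the proofs are below) =====
def Claim_equal_max_score1 : Prop := ∀ (nums : List Int), Dom_max_score1 nums → Spec_max_score1 nums (max_score1 nums)

-- ===== LEMMAS AND PROOFS =====

-- the pure (memo-free) value of rec(mask): reference function for the proofs
def pvBRec (nums : List Int) (n final_mask : Nat) : Nat → Nat → Int
  | 0, _ => -1
  | fuel+1, mask =>
    if mask = final_mask then 0
    else
      let pairs := PySem.Int.bitCount (mask : Int) / 2
      (List.range n).foldl (fun best i =>
        if (mask >>> i) &&& 1 = 1 then best
        else (List.range' (i+1) (n-(i+1))).foldl (fun best j =>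
          if (mask >>> j) &&& 1 = 1 then best
          else max best (((pairs : Int) + 1) * (Int.gcd (nums.getD i 0) (nums.getD j 0) : Int)
            + pvBRec nums n final_mask fuel (mask ||| (1 <<< i) ||| (1 <<< j)))) best) (-1)

-- number of set bits of m among bit positions 0..n-1
def pvPopB (n m : Nat) : Nat := (List.range n).countP (fun k => m.testBit k)

-- the B-shaped running-max folds, reading remaining scores through a value function v
def pvBestJ (nums : List Int) (n state i pairs : Nat) (v : Nat → Int) (b : Int) : Int :=
  (List.range' (i+1) (n-(i+1))).foldl (fun b j =>
    if (state >>> j) &&& 1 = 1 then b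
    else max b (((pairs : Int) + 1) * (Int.gcd (nums.getD i 0) (nums.getD j 0) : Int)
      + v (state ||| (1 <<< i) ||| (1 <<< j)))) b

def pvBestI (nums : List Int) (n state pairs : Nat) (v : Nat → Int) : Int :=
  (List.range n).foldl (fun best i =>
    if (state >>> i) &&& 1 = 1 then best
    else pvBestJ nums n state i pairs v best) (-1)

-- the value dp[t] holds after states final_mask-1 … m have been processed
def pvVal (nums : List Int) (n m t : Nat) : Int :=
  if t = 2^n - 1 then 0
  else if m ≤ t ∧ PySem.Int.bitCount (t : Int) % 2 = 0 then pvBRec nums n (2^n - 1) (n+1) t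
  else -1

def pvInv (nums : List Int) (n m : Nat) (dp : List Int) : Prop :=
  dp.length = 2^n ∧ ∀ t, t < 2^n → dp.getD t (-1) = pvVal nums n m t

lemma pvGuard (m i : Nat) : ((m >>> i) &&& 1 = 1) ↔ m.testBit i = true := by
  rw [Nat.and_one_is_mod]
  have h := @Nat.decide_shiftRight_mod_two_eq_one m i
  constructor
  · intro hh; rw [← h]; exact decide_eq_true hh
  · intro hh; rw [← h] at hh; exact of_decide_eq_true hh

lemma pvBitCount_eq (n : Nat) : ∀ m : Nat, m < 2^n → PySem.Int.bitCount (m : Int) = pvPopB n m := by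
  induction n with
  | zero =>
    intro m hm
    interval_cases m
    simp [pvPopB]
  | succ n ih =>
    intro m hm
    rcases Nat.eq_zero_or_pos m with h0 | hpos
    · subst h0; simp [pvPopB]
    · rw [PySem.Int.bitCount_natCast hpos]
      have hdiv : m / 2 < 2^n := by
        have : 2^(n+1) = 2^n * 2 := by ring
        omega
      rw [ih _ hdiv]
      unfold pvPopB
      rw [List.range_succ_eq_map, List.countP_cons, List.countP_map]
      have hb0 : m.testBit 0 = decide (m % 2 = 1) := Nat.testBit_zero m
      have h2 : (List.range n).countP ((fun k => m.testBit k) ∘ Nat.succ)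
          = (List.range n).countP (fun k => (m/2).testBit k) := by
        apply List.countP_congr; intro k _
        simp [Function.comp, Nat.testBit_add_one]
      rw [h2, hb0]
      rcases Nat.mod_two_eq_zero_or_one m with h | h <;> (simp [h]; try omega)

lemma pvCountP_or (p : Nat → Bool) (i : Nat) (hpi : p i = false) :
    ∀ l : List Nat, l.countP (fun k => p k || k == i) = l.countP p + l.count i := by
  intro l
  induction l with
  | nil => simp
  | cons x l ih =>
    by_cases hx : x = i
    · subst hx
      simp [hpi, ih]
      omega
    · simp [List.countP_cons, hx, ih]
      rcases hp : p x <;> (simp; try omega)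

lemma pvPopB_or2 (n m i j : Nat) (hi : i < n) (hj : j < n) (hij : i ≠ j)
    (hbi : m.testBit i = false) (hbj : m.testBit j = false) :
    pvPopB n (m ||| 1 <<< i ||| 1 <<< j) = pvPopB n m + 2 := by
  unfold pvPopB
  have hpt : ∀ k, (m ||| 1 <<< i ||| 1 <<< j).testBit k
      = ((m.testBit k || k == i) || k == j) := by
    intro k
    simp only [Nat.testBit_or, Nat.one_shiftLeft, Nat.testBit_two_pow]
    by_cases h1 : k = i <;> by_cases h2 : k = j <;>
      simp [h1, h2, eq_comm]
    rw [beq_eq_false_iff_ne.mpr h1, beq_eq_false_iff_ne.mpr h2,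
      decide_eq_false (fun h => h1 h.symm), decide_eq_false (fun h => h2 h.symm)]
  have hcongr : (List.range n).countP (fun k => (m ||| 1 <<< i ||| 1 <<< j).testBit k)
      = (List.range n).countP (fun k => (m.testBit k || k == i) || k == j) := by
    apply List.countP_congr; intro k _; simp [hpt]
  rw [hcongr]
  have h1 : (List.range n).countP (fun k => (fun k => m.testBit k || k == i) k || k == j)
      = (List.range n).countP (fun k => m.testBit k || k == i) + (List.range n).count j := by
    apply pvCountP_or
    simp [hbj]
    omega
  have h2 : (List.range n).countP (fun k => m.testBit k || k == i)
      = (List.range n).countP (fun k => m.testBit k) + (List.range n).count i := by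
    apply pvCountP_or; simp [hbi]
  have hci : (List.range n).count i = 1 :=
    List.count_eq_one_of_mem (List.nodup_range) (List.mem_range.mpr hi)
  have hcj : (List.range n).count j = 1 :=
    List.count_eq_one_of_mem (List.nodup_range) (List.mem_range.mpr hj)
  simp only [h1, h2, hci, hcj]

lemma pvPopB_le (n m : Nat) : pvPopB n m ≤ n := by
  have := List.countP_le_length (p := fun k => m.testBit k) (l := List.range n)
  simpa [pvPopB] using this

lemma pvPopB_eq_iff (n m : Nat) (hm : m < 2^n) : pvPopB n m = n ↔ m = 2^n - 1 := by
  constructor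
  · intro h
    have hall : ∀ k ∈ List.range n, (fun k => m.testBit k) k :=
      List.countP_eq_length.mp (by simpa [pvPopB, List.length_range] using h)
    apply Nat.eq_of_testBit_eq
    intro k
    rw [Nat.testBit_two_pow_sub_one]
    by_cases hk : k < n
    · simpa [hk] using hall k (List.mem_range.mpr hk)
    · simp [hk]
      exact Nat.testBit_lt_two_pow
        (lt_of_lt_of_le hm (Nat.pow_le_pow_right (by norm_num) (by omega)))
  · intro h
    subst h
    unfold pvPopB
    rw [List.countP_eq_length.mpr]
    · exact List.length_range ..
    · intro k hk
      rw [Nat.testBit_two_pow_sub_one]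
      simpa using List.mem_range.mp hk

lemma pvOrLt (n m i j : Nat) (hm : m < 2^n) (hi : i < n) (hj : j < n) :
    m ||| 1 <<< i ||| 1 <<< j < 2^n := by
  have h1 : (1 <<< i : Nat) < 2^n := by
    rw [Nat.one_shiftLeft]; exact Nat.pow_lt_pow_right (by norm_num) hi
  have h2 : (1 <<< j : Nat) < 2^n := by
    rw [Nat.one_shiftLeft]; exact Nat.pow_lt_pow_right (by norm_num) hj
  exact Nat.or_lt_two_pow (Nat.or_lt_two_pow hm h1) h2

lemma pvLtOr (m i j : Nat) (hbi : m.testBit i = false) : m < m ||| 1 <<< i ||| 1 <<< j := by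
  have hle : m ≤ m ||| 1 <<< i ||| 1 <<< j :=
    le_trans Nat.left_le_or Nat.left_le_or
  rcases Nat.lt_or_ge m (m ||| 1 <<< i ||| 1 <<< j) with h | h
  · exact h
  · exfalso
    have heq : m = m ||| 1 <<< i ||| 1 <<< j := le_antisymm hle h
    have hbit : (m ||| 1 <<< i ||| 1 <<< j).testBit i = true := by
      simp [Nat.testBit_or, Nat.one_shiftLeft, Nat.testBit_two_pow]
    rw [← heq, hbi] at hbit
    exact Bool.false_ne_true hbit

lemma pvBRec_fuel (nums : List Int) (n : Nat) :
    ∀ f g mask, mask < 2^n → n ≤ pvPopB n mask + 2*f → n ≤ pvPopB n mask + 2*g →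
    pvBRec nums n (2^n - 1) (f+1) mask = pvBRec nums n (2^n - 1) (g+1) mask := by
  intro f
  induction f with
  | zero =>
    intro g mask hlt hf hg
    have hpop : pvPopB n mask = n := le_antisymm (pvPopB_le n mask) (by omega)
    have hmask : mask = 2^n - 1 := (pvPopB_eq_iff n mask hlt).mp hpop
    simp [pvBRec, hmask]
  | succ f ih =>
    intro g mask hlt hf hg
    by_cases hmask : mask = 2^n - 1
    · simp [pvBRec, hmask]
    · have hpoplt : pvPopB n mask < n :=
        lt_of_le_of_ne (pvPopB_le n mask) (fun h => hmask ((pvPopB_eq_iff n mask hlt).mp h))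
      obtain ⟨g', rfl⟩ : ∃ g', g = g' + 1 := by
        cases g with
        | zero => omega
        | succ g' => exact ⟨g', rfl⟩
      simp only [pvBRec]
      rw [if_neg hmask, if_neg hmask]
      apply PySem.List.foldl_congr_mem
      intro acc i hi
      by_cases hbi : (mask >>> i) &&& 1 = 1
      · simp [hbi]
      · simp only [if_neg hbi]
        apply PySem.List.foldl_congr_mem
        intro acc2 j hj
        by_cases hbj : (mask >>> j) &&& 1 = 1
        · simp [hbj]
        · simp only [if_neg hbj]
          have hi' : i < n := List.mem_range.mp hi
          obtain ⟨hj1, hj2⟩ := List.mem_range'_1.mp hj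
          have hj' : j < n := by omega
          have hij : i ≠ j := by omega
          have hfi : mask.testBit i = false := by
            rcases hb : mask.testBit i with _ | _
            · rfl
            · exact absurd ((pvGuard mask i).mpr hb) hbi
          have hfj : mask.testBit j = false := by
            rcases hb : mask.testBit j with _ | _
            · rfl
            · exact absurd ((pvGuard mask j).mpr hb) hbj
          have hpop2 : pvPopB n (mask ||| 1 <<< i ||| 1 <<< j) = pvPopB n mask + 2 :=
            pvPopB_or2 n mask i j hi' hj' hij hfi hfj
          have hlt2 : mask ||| 1 <<< i ||| 1 <<< j < 2^n := pvOrLt n mask i j hlt hi' hj'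
          congr 1
          congr 1
          exact ih g' _ hlt2 (by omega) (by omega)

lemma pvSetMaxJ (nums : List Int) (state i pairs : Nat) (hfree : state.testBit i = false) :
    ∀ (l : List Nat) (dp : List Int), state < dp.length →
    l.foldl (fun dp j =>
      if (state >>> j) &&& 1 = 1 then dp
      else dp.set state (max (dp.getD state (-1))
        (((pairs : Int) + 1) * (Int.gcd (nums.getD i 0) (nums.getD j 0) : Int)
          + dp.getD (state ||| (1 <<< i) ||| (1 <<< j)) (-1)))) dp
    = dp.set state (l.foldl (fun b j =>
        if (state >>> j) &&& 1 = 1 then b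
        else max b (((pairs : Int) + 1) * (Int.gcd (nums.getD i 0) (nums.getD j 0) : Int)
          + dp.getD (state ||| (1 <<< i) ||| (1 <<< j)) (-1))) (dp.getD state (-1))) := by
  intro l
  induction l with
  | nil =>
    intro dp h
    simp only [List.foldl_nil]
    have : dp.getD state (-1) = dp[state] := by
      rw [List.getD_eq_getElem?_getD, List.getElem?_eq_getElem h]; rfl
    rw [this, List.set_getElem_self h]
  | cons j l ih =>
    intro dp h
    by_cases hg : (state >>> j) &&& 1 = 1
    · simp only [List.foldl_cons, if_pos hg]
      exact ih dp h
    · simp only [List.foldl_cons, if_neg hg]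
      have hne : ∀ j' : Nat, state ≠ state ||| (1 <<< i) ||| (1 <<< j') :=
        fun j' => Nat.ne_of_lt (pvLtOr state i j' hfree)
      have hlen : state < (dp.set state (max (dp.getD state (-1))
          (((pairs : Int) + 1) * (Int.gcd (nums.getD i 0) (nums.getD j 0) : Int)
            + dp.getD (state ||| (1 <<< i) ||| (1 <<< j)) (-1)))).length := by
        simpa using h
      rw [ih _ hlen, List.set_set]
      have hget : ∀ (v : Int), (dp.set state v).getD state (-1) = v := by
        intro v
        rw [List.getD_eq_getElem?_getD, List.getElem?_set_self h]
        rfl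
      have hgetne : ∀ (v : Int) (k : Nat), state ≠ k → (dp.set state v).getD k (-1) = dp.getD k (-1) := by
        intro v k hk
        rw [List.getD_eq_getElem?_getD, List.getElem?_set_ne hk, ← List.getD_eq_getElem?_getD]
      rw [hget]
      congr 1
      apply PySem.List.foldl_congr_mem
      intro acc j' _
      by_cases hg' : (state >>> j') &&& 1 = 1
      · simp [hg']
      · simp only [if_neg hg']
        rw [hgetne _ _ (hne j')]

lemma pvAInnerJ_eq (nums : List Int) (n state i pairs : Nat) (dp : List Int)
    (hst : state < dp.length) (hfree : state.testBit i = false) :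
    pvAInnerJ nums n state i pairs dp
    = dp.set state (pvBestJ nums n state i pairs (fun sa => dp.getD sa (-1)) (dp.getD state (-1))) := by
  exact pvSetMaxJ nums state i pairs hfree (List.range' (i+1) (n-(i+1))) dp hst

lemma pvBestJ_congr (nums : List Int) (n state i pairs : Nat) (v1 v2 : Nat → Int) (b : Int)
    (h : ∀ j, i+1 ≤ j → j < n → state.testBit j = false →
      v1 (state ||| (1 <<< i) ||| (1 <<< j)) = v2 (state ||| (1 <<< i) ||| (1 <<< j))) :
    pvBestJ nums n state i pairs v1 b = pvBestJ nums n state i pairs v2 b := by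
  unfold pvBestJ
  apply PySem.List.foldl_congr_mem
  intro acc j hj
  obtain ⟨hj1, hj2⟩ := List.mem_range'_1.mp hj
  have hjn : j < n := by omega
  by_cases hg : (state >>> j) &&& 1 = 1
  · simp [hg]
  · simp only [if_neg hg]
    have hfree : state.testBit j = false := by
      rcases hb : state.testBit j with _ | _
      · rfl
      · exact absurd ((pvGuard state j).mpr hb) hg
    rw [h j hj1 hjn hfree]

lemma pvSetMaxI (nums : List Int) (n state pairs : Nat) :
    ∀ (l : List Nat) (dp : List Int), state < dp.length →
    l.foldl (fun dp i =>
      if (state >>> i) &&& 1 = 1 then dp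
      else pvAInnerJ nums n state i pairs dp) dp
    = dp.set state (l.foldl (fun b i =>
        if (state >>> i) &&& 1 = 1 then b
        else pvBestJ nums n state i pairs (fun sa => dp.getD sa (-1)) b) (dp.getD state (-1))) := by
  intro l
  induction l with
  | nil =>
    intro dp h
    simp only [List.foldl_nil]
    have : dp.getD state (-1) = dp[state] := by
      rw [List.getD_eq_getElem?_getD, List.getElem?_eq_getElem h]; rfl
    rw [this, List.set_getElem_self h]
  | cons i l ih =>
    intro dp h
    by_cases hg : (state >>> i) &&& 1 = 1
    · simp only [List.foldl_cons, if_pos hg]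
      exact ih dp h
    · simp only [List.foldl_cons, if_neg hg]
      have hfree : state.testBit i = false := by
        rcases hb : state.testBit i with _ | _
        · rfl
        · exact absurd ((pvGuard state i).mpr hb) hg
      rw [pvAInnerJ_eq nums n state i pairs dp h hfree]
      have hlen : state < (dp.set state (pvBestJ nums n state i pairs
          (fun sa => dp.getD sa (-1)) (dp.getD state (-1)))).length := by simpa using h
      rw [ih _ hlen, List.set_set]
      have hget : ∀ (v : Int), (dp.set state v).getD state (-1) = v := by
        intro v
        rw [List.getD_eq_getElem?_getD, List.getElem?_set_self h]
        rfl
      have hgetne : ∀ (v : Int) (k : Nat), state ≠ k →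
          (dp.set state v).getD k (-1) = dp.getD k (-1) := by
        intro v k hk
        rw [List.getD_eq_getElem?_getD, List.getElem?_set_ne hk, ← List.getD_eq_getElem?_getD]
      rw [hget]
      congr 1
      apply PySem.List.foldl_congr_mem
      intro acc i' _
      by_cases hg' : (state >>> i') &&& 1 = 1
      · simp [hg']
      · simp only [if_neg hg']
        have hfree' : state.testBit i' = false := by
          rcases hb : state.testBit i' with _ | _
          · rfl
          · exact absurd ((pvGuard state i').mpr hb) hg'
        apply pvBestJ_congr
        intro j _ _ _
        exact hgetne _ _ (Nat.ne_of_lt (pvLtOr state i' j hfree'))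

lemma pvAState_eq (nums : List Int) (n state : Nat) (dp : List Int)
    (hst : state < dp.length) (heven : PySem.Int.bitCount (state : Int) % 2 = 0)
    (hinit : dp.getD state (-1) = -1) :
    pvAState nums n dp state
    = dp.set state (pvBestI nums n state (PySem.Int.bitCount (state : Int) / 2)
        (fun sa => dp.getD sa (-1))) := by
  unfold pvAState
  rw [if_neg (by omega)]
  rw [pvSetMaxI nums n state (PySem.Int.bitCount (state : Int) / 2) (List.range n) dp hst]
  rw [hinit]
  rfl

lemma pvBRec_succ (nums : List Int) (n F fuel mask : Nat) :
    pvBRec nums n F (fuel+1) mask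
    = if mask = F then 0
      else pvBestI nums n mask (PySem.Int.bitCount (mask : Int) / 2) (pvBRec nums n F fuel) := by
  rfl

lemma pvBestI_congr (nums : List Int) (n state pairs : Nat) (v1 v2 : Nat → Int)
    (h : ∀ i j, i < n → i+1 ≤ j → j < n → state.testBit i = false → state.testBit j = false →
      v1 (state ||| (1 <<< i) ||| (1 <<< j)) = v2 (state ||| (1 <<< i) ||| (1 <<< j))) :
    pvBestI nums n state pairs v1 = pvBestI nums n state pairs v2 := by
  unfold pvBestI
  apply PySem.List.foldl_congr_mem
  intro acc i hi
  have hin : i < n := List.mem_range.mp hi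
  by_cases hg : (state >>> i) &&& 1 = 1
  · simp [hg]
  · simp only [if_neg hg]
    have hfree : state.testBit i = false := by
      rcases hb : state.testBit i with _ | _
      · rfl
      · exact absurd ((pvGuard state i).mpr hb) hg
    apply pvBestJ_congr
    intro j hj1 hj2 hbj
    exact h i j hin hj1 hj2 hfree hbj

lemma pvVal_off (nums : List Int) (n m t : Nat) (ht : t ≠ m) :
    pvVal nums n (m+1) t = pvVal nums n m t := by
  unfold pvVal
  by_cases htF : t = 2^n - 1
  · simp [htF]
  · rw [if_neg htF, if_neg htF]
    by_cases hE : PySem.Int.bitCount (t : Int) % 2 = 0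
    · by_cases hle : m ≤ t
      · rw [if_pos ⟨by omega, hE⟩, if_pos ⟨hle, hE⟩]
      · rw [if_neg (fun hc => hle (by omega)), if_neg (fun hc => hle hc.1)]
    · rw [if_neg (fun hc => hE hc.2), if_neg (fun hc => hE hc.2)]

lemma pvStep (nums : List Int) (n m : Nat) (dp : List Int)
    (h : pvInv nums n (m+1) dp) (hm : m < 2^n - 1) :
    pvInv nums n m (pvAState nums n dp m) := by
  obtain ⟨hlen, hval⟩ := h
  have hmlt : m < 2^n := by omega
  have hmne : m ≠ 2^n - 1 := by omega
  have hn1 : 1 ≤ n := by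
    by_contra h0
    interval_cases n
    omega
  have hmdp : m < dp.length := by omega
  by_cases hodd : PySem.Int.bitCount (m : Int) % 2 = 1
  · have heq : pvAState nums n dp m = dp := by
      unfold pvAState; rw [if_pos hodd]
    rw [heq]
    refine ⟨hlen, ?_⟩
    intro t ht
    rw [hval t ht]
    by_cases htm : t = m
    · subst htm
      unfold pvVal
      rw [if_neg hmne, if_neg hmne, if_neg (by omega), if_neg (fun hc => by omega)]
    · exact pvVal_off nums n m t htm
  · have heven : PySem.Int.bitCount (m : Int) % 2 = 0 := by omega
    have hinitm : dp.getD m (-1) = -1 := by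
      rw [hval m hmlt]
      unfold pvVal
      rw [if_neg hmne, if_neg (by omega)]
    rw [pvAState_eq nums n m dp hmdp heven hinitm]
    refine ⟨by simpa using hlen, ?_⟩
    intro t ht
    by_cases htm : t = m
    · subst htm
      rw [List.getD_eq_getElem?_getD, List.getElem?_set_self hmdp]
      show pvBestI nums n t (PySem.Int.bitCount (t : Int) / 2) (fun sa => dp.getD sa (-1))
          = pvVal nums n t t
      unfold pvVal
      rw [if_neg hmne, if_pos ⟨le_refl t, heven⟩]
      rw [pvBRec_succ]
      rw [if_neg hmne]
      apply pvBestI_congr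
      intro i j hi hj1 hj2 hbi hbj
      have hij : i ≠ j := by omega
      have hsaF : t ||| 1 <<< i ||| 1 <<< j < 2^n := pvOrLt n t i j hmlt hi hj2
      have hsagt : t < t ||| 1 <<< i ||| 1 <<< j := pvLtOr t i j hbi
      have hpop2 : pvPopB n (t ||| 1 <<< i ||| 1 <<< j) = pvPopB n t + 2 :=
        pvPopB_or2 n t i j hi hj2 hij hbi hbj
      have hbc2 : PySem.Int.bitCount ((t ||| 1 <<< i ||| 1 <<< j : Nat) : Int)
          = PySem.Int.bitCount ((t : Nat) : Int) + 2 := by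
        rw [pvBitCount_eq n _ hsaF, pvBitCount_eq n _ hmlt, hpop2]
      rw [hval _ hsaF]
      unfold pvVal
      by_cases hsaFm : t ||| 1 <<< i ||| 1 <<< j = 2^n - 1
      · rw [if_pos hsaFm]
        obtain ⟨n', rfl⟩ : ∃ n', n = n' + 1 := ⟨n - 1, by omega⟩
        rw [hsaFm, pvBRec_succ, if_pos rfl]
      · rw [if_neg hsaFm, if_pos ⟨by omega, by omega⟩]
        obtain ⟨n', rfl⟩ : ∃ n', n = n' + 1 := ⟨n - 1, by omega⟩
        apply pvBRec_fuel nums (n'+1) (n'+1) n' _ hsaF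
        · have := pvPopB_le (n'+1) t
          omega
        · have := pvPopB_le (n'+1) t
          omega
    · have hne : m ≠ t := fun hc => htm hc.symm
      rw [List.getD_eq_getElem?_getD, List.getElem?_set_ne hne, ← List.getD_eq_getElem?_getD]
      rw [hval t ht]
      exact pvVal_off nums n m t htm

lemma pvLoop (nums : List Int) (n : Nat) :
    ∀ (m : Nat), m ≤ 2^n - 1 → ∀ dp, pvInv nums n m dp →
    pvInv nums n 0 ((List.range m).foldr (fun s dp => pvAState nums n dp s) dp) := by
  intro m
  induction m with
  | zero =>
    intro _ dp h
    simpa using h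
  | succ m ih =>
    intro hm dp h
    rw [List.range_succ, List.foldr_append]
    simp only [List.foldr_cons, List.foldr_nil]
    exact ih (by omega) _ (pvStep nums n m dp h (by omega))

lemma pvRangeFold (nums : List Int) (n : Nat) :
    ∀ (m : Nat) (dp : List Int),
    (PySem.List.pyRange ((m : Int) - 1) (-1) (-1)).foldl
      (fun dp state => pvAState nums n dp state.toNat) dp
    = (List.range m).foldr (fun s dp => pvAState nums n dp s) dp := by
  intro m
  induction m with
  | zero =>
    intro dp
    rw [show ((0:Nat):Int) - 1 = -1 by norm_num]
    rw [PySem.List.pyRange_neg_one_eq_nil (le_refl _)]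
    simp
  | succ m ih =>
    intro dp
    rw [show ((m+1 : Nat) : Int) - 1 = ((m : Nat) : Int) by push_cast; ring]
    rw [PySem.List.pyRange_neg_one_cons (by omega)]
    simp only [List.foldl_cons, Int.toNat_natCast]
    rw [ih]
    rw [List.range_succ, List.foldr_append]
    simp only [List.foldr_cons, List.foldr_nil]

lemma pvInit (nums : List Int) (n : Nat) :
    pvInv nums n (2^n - 1) ((List.replicate (2^n) (-1 : Int)).set (2^n - 1) 0) := by
  have hpos : 0 < 2^n := Nat.two_pow_pos _
  constructor
  · simp
  · intro t ht
    unfold pvVal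
    by_cases htF : t = 2^n - 1
    · subst htF
      rw [List.getD_eq_getElem?_getD, List.getElem?_set_self (by simp)]
      simp
    · rw [List.getD_eq_getElem?_getD, List.getElem?_set_ne (fun hc => htF hc.symm),
        List.getElem?_replicate_of_lt ht]
      rw [if_neg htF, if_neg (fun hc => by omega)]
      rfl

-- canonical value of rec(mask) (fuel n+1 is always sufficient: n ≤ pvPopB n mask + 2*n)
def pvR (nums : List Int) (n mask : Nat) : Int := pvBRec nums n (2^n - 1) (n+1) mask

-- every value stored in the memo is the canonical value of its mask
def pvMemoOK (nums : List Int) (n : Nat) (memo : Array (Option Int)) : Prop :=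
  ∀ k v, memo.getD k none = some v → v = pvR nums n k

lemma pvR_eq_fuel (nums : List Int) (n mask f : Nat) (hlt : mask < 2^n)
    (hf : n ≤ pvPopB n mask + 2*f) : pvBRec nums n (2^n - 1) (f+1) mask = pvR nums n mask := by
  apply pvBRec_fuel nums n f n mask hlt hf
  omega

lemma pvMemoFoldJ (nums : List Int) (n mask i pairs fuel : Nat)
    (hc : ∀ j, i+1 ≤ j → j < n → mask.testBit j = false → ∀ memo, pvMemoOK nums n memo →
      (pvBRecM nums n (2^n - 1) fuel (mask ||| (1 <<< i) ||| (1 <<< j)) memo).1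
        = pvR nums n (mask ||| (1 <<< i) ||| (1 <<< j))
      ∧ pvMemoOK nums n (pvBRecM nums n (2^n - 1) fuel (mask ||| (1 <<< i) ||| (1 <<< j)) memo).2) :
    ∀ (l : List Nat), (∀ j ∈ l, i+1 ≤ j ∧ j < n) → ∀ (acc : Int × Array (Option Int)),
    pvMemoOK nums n acc.2 →
    (l.foldl (fun acc j =>
        if (mask >>> j) &&& 1 = 1 then acc
        else
          let vr := pvBRecM nums n (2^n - 1) fuel (mask ||| (1 <<< i) ||| (1 <<< j)) acc.2
          (max acc.1 (((pairs : Int) + 1) * (Int.gcd (nums.getD i 0) (nums.getD j 0) : Int)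
            + vr.1), vr.2)) acc).1
      = l.foldl (fun b j =>
          if (mask >>> j) &&& 1 = 1 then b
          else max b (((pairs : Int) + 1) * (Int.gcd (nums.getD i 0) (nums.getD j 0) : Int)
            + pvR nums n (mask ||| (1 <<< i) ||| (1 <<< j)))) acc.1
    ∧ pvMemoOK nums n (l.foldl (fun acc j =>
        if (mask >>> j) &&& 1 = 1 then acc
        else
          let vr := pvBRecM nums n (2^n - 1) fuel (mask ||| (1 <<< i) ||| (1 <<< j)) acc.2
          (max acc.1 (((pairs : Int) + 1) * (Int.gcd (nums.getD i 0) (nums.getD j 0) : Int)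
            + vr.1), vr.2)) acc).2 := by
  intro l
  induction l with
  | nil => intro _ acc hm; exact ⟨rfl, hm⟩
  | cons j l ih =>
    intro hl acc hm
    obtain ⟨hj1, hj2⟩ := hl j (List.mem_cons_self ..)
    by_cases hg : (mask >>> j) &&& 1 = 1
    · simp only [List.foldl_cons, if_pos hg]
      exact ih (fun x hx => hl x (List.mem_cons_of_mem _ hx)) acc hm
    · simp only [List.foldl_cons, if_neg hg]
      have hfree : mask.testBit j = false := by
        rcases hb : mask.testBit j with _ | _
        · rfl
        · exact absurd ((pvGuard mask j).mpr hb) hg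
      obtain ⟨hv, hm'⟩ := hc j hj1 hj2 hfree acc.2 hm
      rw [hv]
      exact ih (fun x hx => hl x (List.mem_cons_of_mem _ hx)) _ hm'

lemma pvMemoFoldI (nums : List Int) (n mask pairs fuel : Nat)
    (hc : ∀ i j, i < n → i+1 ≤ j → j < n → mask.testBit i = false → mask.testBit j = false →
      ∀ memo, pvMemoOK nums n memo →
      (pvBRecM nums n (2^n - 1) fuel (mask ||| (1 <<< i) ||| (1 <<< j)) memo).1
        = pvR nums n (mask ||| (1 <<< i) ||| (1 <<< j))
      ∧ pvMemoOK nums n (pvBRecM nums n (2^n - 1) fuel (mask ||| (1 <<< i) ||| (1 <<< j)) memo).2) :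
    ∀ (l : List Nat), (∀ i ∈ l, i < n) → ∀ (acc : Int × Array (Option Int)),
    pvMemoOK nums n acc.2 →
    (l.foldl (fun (acc : Int × Array (Option Int)) i =>
        if (mask >>> i) &&& 1 = 1 then acc
        else (List.range' (i+1) (n-(i+1))).foldl (fun acc j =>
          if (mask >>> j) &&& 1 = 1 then acc
          else
            let vr := pvBRecM nums n (2^n - 1) fuel (mask ||| (1 <<< i) ||| (1 <<< j)) acc.2
            (max acc.1 (((pairs : Int) + 1) * (Int.gcd (nums.getD i 0) (nums.getD j 0) : Int)
              + vr.1), vr.2)) acc) acc).1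
      = l.foldl (fun b i =>
          if (mask >>> i) &&& 1 = 1 then b
          else pvBestJ nums n mask i pairs (pvR nums n) b) acc.1
    ∧ pvMemoOK nums n (l.foldl (fun (acc : Int × Array (Option Int)) i =>
        if (mask >>> i) &&& 1 = 1 then acc
        else (List.range' (i+1) (n-(i+1))).foldl (fun acc j =>
          if (mask >>> j) &&& 1 = 1 then acc
          else
            let vr := pvBRecM nums n (2^n - 1) fuel (mask ||| (1 <<< i) ||| (1 <<< j)) acc.2
            (max acc.1 (((pairs : Int) + 1) * (Int.gcd (nums.getD i 0) (nums.getD j 0) : Int)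
              + vr.1), vr.2)) acc) acc).2 := by
  intro l
  induction l with
  | nil => intro _ acc hm; exact ⟨rfl, hm⟩
  | cons i l ih =>
    intro hl acc hm
    have hin : i < n := hl i (List.mem_cons_self ..)
    by_cases hg : (mask >>> i) &&& 1 = 1
    · simp only [List.foldl_cons, if_pos hg]
      exact ih (fun x hx => hl x (List.mem_cons_of_mem _ hx)) acc hm
    · simp only [List.foldl_cons, if_neg hg]
      have hfree : mask.testBit i = false := by
        rcases hb : mask.testBit i with _ | _
        · rfl
        · exact absurd ((pvGuard mask i).mpr hb) hg
      have hj := pvMemoFoldJ nums n mask i pairs fuel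
        (fun j hj1 hj2 hbj => hc i j hin hj1 hj2 hfree hbj)
        (List.range' (i+1) (n-(i+1)))
        (fun j hjm => by
          obtain ⟨h1, h2⟩ := List.mem_range'_1.mp hjm
          exact ⟨h1, by omega⟩) acc hm
      obtain ⟨hv, hm'⟩ := hj
      rw [show pvBestJ nums n mask i pairs (pvR nums n) acc.1
          = (List.range' (i+1) (n-(i+1))).foldl (fun b j =>
              if (mask >>> j) &&& 1 = 1 then b
              else max b (((pairs : Int) + 1) * (Int.gcd (nums.getD i 0) (nums.getD j 0) : Int)
                + pvR nums n (mask ||| (1 <<< i) ||| (1 <<< j)))) acc.1 from rfl]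
      rw [← hv]
      exact ih (fun x hx => hl x (List.mem_cons_of_mem _ hx)) _ hm'

lemma pvBRecM_miss (nums : List Int) (n F f mask : Nat) (memo : Array (Option Int))
    (hmask : mask ≠ F) (hmem : memo.getD mask none = none) :
    pvBRecM nums n F (f+1) mask memo
    = (let pairs := PySem.Int.bitCount (mask : Int) / 2
       let r := (List.range n).foldl (fun (acc : Int × Array (Option Int)) i =>
          if (mask >>> i) &&& 1 = 1 then acc
          else (List.range' (i+1) (n-(i+1))).foldl (fun acc j =>
            if (mask >>> j) &&& 1 = 1 then acc
            else
              let vr := pvBRecM nums n F f (mask ||| (1 <<< i) ||| (1 <<< j)) acc.2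
              (max acc.1 (((pairs : Int) + 1) * (Int.gcd (nums.getD i 0) (nums.getD j 0) : Int)
                + vr.1), vr.2)) acc) ((-1 : Int), memo)
       (r.1, r.2.setIfInBounds mask (some r.1))) := by
  conv_lhs => rw [pvBRecM]
  rw [if_neg hmask, hmem]

lemma pvBRecM_hit (nums : List Int) (n F f mask : Nat) (memo : Array (Option Int)) (v : Int)
    (hmask : mask ≠ F) (hmem : memo.getD mask none = some v) :
    pvBRecM nums n F (f+1) mask memo = (v, memo) := by
  conv_lhs => rw [pvBRecM]
  rw [if_neg hmask, hmem]

lemma pvMemoOK_insert (nums : List Int) (n mask : Nat) (r : Int × Array (Option Int))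
    (hm : pvMemoOK nums n r.2) (hr : r.1 = pvR nums n mask) :
    pvMemoOK nums n (r.2.setIfInBounds mask (some r.1)) := by
  intro k v hk
  rw [Array.getD_eq_getD_getElem?] at hk
  by_cases hkm : mask = k
  · subst hkm
    by_cases hsz : mask < r.2.size
    · rw [Array.getElem?_setIfInBounds_self_of_lt hsz] at hk
      simp only [Option.getD_some] at hk
      rw [← hr]
      exact (Option.some_injective _ hk).symm
    · have hnone : (r.2.setIfInBounds mask (some r.1))[mask]? = none := by
        apply Array.getElem?_eq_none
        simpa [Array.size_setIfInBounds] using Nat.le_of_not_lt hsz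
      rw [hnone] at hk
      simp at hk
  · rw [Array.getElem?_setIfInBounds_ne hkm] at hk
    exact hm k v (by rw [Array.getD_eq_getD_getElem?]; exact hk)

lemma pvBRecM_ok (nums : List Int) (n : Nat) :
    ∀ f mask memo, mask < 2^n → n ≤ pvPopB n mask + 2*f → pvMemoOK nums n memo →
    (pvBRecM nums n (2^n - 1) (f+1) mask memo).1 = pvR nums n mask
    ∧ pvMemoOK nums n (pvBRecM nums n (2^n - 1) (f+1) mask memo).2 := by
  intro f
  induction f with
  | zero =>
    intro mask memo hlt hf hm
    have hpop : pvPopB n mask = n := le_antisymm (pvPopB_le n mask) (by omega)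
    have hmask : mask = 2^n - 1 := (pvPopB_eq_iff n mask hlt).mp hpop
    subst hmask
    have h0 : pvR nums n (2^n - 1) = 0 := by
      unfold pvR; rw [pvBRec_succ, if_pos rfl]
    exact ⟨by simp [pvBRecM, h0], by simp [pvBRecM, hm]⟩
  | succ f ih =>
    intro mask memo hlt hf hm
    by_cases hmask : mask = 2^n - 1
    · subst hmask
      have h0 : pvR nums n (2^n - 1) = 0 := by
        unfold pvR; rw [pvBRec_succ, if_pos rfl]
      exact ⟨by simp [pvBRecM, h0], by simp [pvBRecM, hm]⟩
    · have hn1 : 1 ≤ n := by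
        by_contra h0
        interval_cases n
        · omega
      rcases hmem : memo.getD mask none with _ | v
      · -- memo miss: compute, store, return
        have hc' : ∀ i j, i < n → i+1 ≤ j → j < n → mask.testBit i = false →
            mask.testBit j = false → ∀ memo', pvMemoOK nums n memo' →
            (pvBRecM nums n (2^n - 1) (f+1) (mask ||| (1 <<< i) ||| (1 <<< j)) memo').1
              = pvR nums n (mask ||| (1 <<< i) ||| (1 <<< j))
            ∧ pvMemoOK nums n
              (pvBRecM nums n (2^n - 1) (f+1) (mask ||| (1 <<< i) ||| (1 <<< j)) memo').2 := by
          intro i j hi hj1 hj2 hbi hbj memo' hm'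
          have hsa : mask ||| 1 <<< i ||| 1 <<< j < 2^n := pvOrLt n mask i j hlt hi hj2
          have hpop2 : pvPopB n (mask ||| 1 <<< i ||| 1 <<< j) = pvPopB n mask + 2 :=
            pvPopB_or2 n mask i j hi hj2 (by omega) hbi hbj
          exact ih _ memo' hsa (by omega) hm'
        have key := pvMemoFoldI nums n mask (PySem.Int.bitCount (mask : Int) / 2) (f+1) hc'
          (List.range n) (fun i hi => List.mem_range.mp hi) ((-1 : Int), memo) hm
        have hpure : pvBestI nums n mask (PySem.Int.bitCount (mask : Int) / 2) (pvR nums n)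
            = pvR nums n mask := by
          have hr : pvR nums n mask
              = pvBestI nums n mask (PySem.Int.bitCount (mask : Int) / 2)
                  (pvBRec nums n (2^n - 1) n) := by
            unfold pvR; rw [pvBRec_succ, if_neg hmask]
          rw [hr]
          apply pvBestI_congr
          intro i j hi hj1 hj2 hbi hbj
          have hsa : mask ||| 1 <<< i ||| 1 <<< j < 2^n := pvOrLt n mask i j hlt hi hj2
          have hpop2 : pvPopB n (mask ||| 1 <<< i ||| 1 <<< j) = pvPopB n mask + 2 :=
            pvPopB_or2 n mask i j hi hj2 (by omega) hbi hbj
          obtain ⟨n', rfl⟩ : ∃ n', n = n' + 1 := ⟨n - 1, by omega⟩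
          exact (pvR_eq_fuel nums (n'+1) _ n' hsa (by have := pvPopB_le (n'+1) mask; omega)).symm
        obtain ⟨hv, hmok⟩ := key
        have hval : (pvBRecM nums n (2^n - 1) (f+1+1) mask memo).1 = pvR nums n mask := by
          rw [pvBRecM_miss nums n (2^n - 1) (f+1) mask memo hmask hmem]
          exact hv.trans hpure
        refine ⟨hval, ?_⟩
        rw [pvBRecM_miss nums n (2^n - 1) (f+1) mask memo hmask hmem]
        exact pvMemoOK_insert nums n mask _ hmok (hv.trans hpure)
      · -- memo hit
        rw [pvBRecM_hit nums n (2^n - 1) (f+1) mask memo v hmask hmem]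
        exact ⟨hm mask v hmem, hm⟩
  
-- ===== VERDICT (by name: the statement is the Claim_ definition above) =====
theorem max_score1_spec : Claim_equal_max_score1 := by
  unfold Claim_equal_max_score1
  intro nums _
  unfold Spec_max_score1
  show ((PySem.List.pyRange (((2 ^ nums.length - 1 : Nat) : Int) - 1) (-1) (-1)).foldl
      (fun dp state => pvAState nums nums.length dp state.toNat)
      ((List.replicate (2 ^ nums.length) (-1 : Int)).set (2 ^ nums.length - 1) 0)).getD 0 (-1)
    = (pvBRecM nums nums.length (2 ^ nums.length - 1) (nums.length + 1) 0
        (Array.replicate (2 ^ nums.length) none)).1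
  rw [pvRangeFold nums nums.length (2 ^ nums.length - 1)]
  have hpos : 0 < 2 ^ nums.length := Nat.two_pow_pos _
  have h1 := pvLoop nums nums.length (2 ^ nums.length - 1) (le_refl _) _
    (pvInit nums nums.length)
  rw [h1.2 0 hpos]
  have hempty : pvMemoOK nums nums.length (Array.replicate (2 ^ nums.length) none) := by
    intro k v hk
    rw [Array.getD_eq_getD_getElem?, Array.getElem?_replicate] at hk
    split at hk <;> simp_all
  have hok := (pvBRecM_ok nums nums.length nums.length 0
    (Array.replicate (2 ^ nums.length) none) hpos (by omega) hempty).1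
  rw [hok]
  unfold pvVal pvR
  by_cases hF : (0 : Nat) = 2 ^ nums.length - 1
  · rw [if_pos hF, pvBRec_succ, if_pos hF]
  · rw [if_neg hF, if_pos ⟨le_refl 0, by simp⟩]
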